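-- pv_equiv track=rewrite | github.com/MoniBarrios/CST_438_p1_group3 | app.py | reason
-- ===== SOURCE A (Python) =====
-- def reason(password): #will tell you what you need to fix in password
--   length = False
--   special = False
--
--   if len(password) >= 6:
--     length = True
--
--   for x in password:
--     if x == '@' or x == '!' or x == '?' or x == '#':
--       special = True
--
--   if not special and not length:
--     return "Password must contain speacial characters [@, !, ?, #].\nPassword must be longer than 6 characters."
--   if not special:
--     return "Password must contain speacial characters [@, !, ?, #]."
--   if not length:
--     return "Password must be longer than 6 characters."
-- ===== SOURCE B (Python) =====
-- def reason(password):
--     errors = []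
--     if not any(c in '@!?#' for c in password):
--         errors.append("Password must contain speacial characters [@, !, ?, #].")
--     if len(password) < 6:
--         errors.append("Password must be longer than 6 characters.")
--     if errors:
--         return "\n".join(errors)
-- ===== Notes on version B (the rewrite author's own statement) =====
-- stated objective: simpler
-- what changed: Replaces A's two boolean flags and three explicit combination branches with one accumulate-errors-and-join pass (any() for the special-char test, a list of messages joined with newline, None when empty).
import Mathlib
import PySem

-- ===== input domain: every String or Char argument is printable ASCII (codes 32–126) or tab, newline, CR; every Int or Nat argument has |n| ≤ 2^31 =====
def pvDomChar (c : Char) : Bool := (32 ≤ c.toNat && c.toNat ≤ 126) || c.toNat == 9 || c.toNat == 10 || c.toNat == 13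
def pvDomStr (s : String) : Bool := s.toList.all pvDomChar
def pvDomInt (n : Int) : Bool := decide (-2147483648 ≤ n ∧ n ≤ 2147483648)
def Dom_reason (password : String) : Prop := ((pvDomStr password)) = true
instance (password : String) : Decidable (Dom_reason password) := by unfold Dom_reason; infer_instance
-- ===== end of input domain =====

-- B replaces A's two boolean flags and three combination branches with a single
-- accumulate-errors-and-join pass (objective: simpler); return values are proved equal.

-- ===== PORT A =====
def reason (password : String) : Option String :=
  let length : Bool := false
  let special : Bool := false
  let length := if PySem.Str.len password ≥ 6 then true else length
  let special := password.toList.foldl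
    (fun sp x => if x = '@' ∨ x = '!' ∨ x = '?' ∨ x = '#' then true else sp) special
  if !special && !length then
    some "Password must contain speacial characters [@, !, ?, #].\nPassword must be longer than 6 characters."
  else if !special then
    some "Password must contain speacial characters [@, !, ?, #]."
  else if !length then
    some "Password must be longer than 6 characters."
  else none

-- ===== PORT B =====
def reason_alt (password : String) : Option String :=
  let errors : List String := []
  let errors := if !(password.toList.any (fun c => "@!?#".toList.contains c)) then
      errors ++ ["Password must contain speacial characters [@, !, ?, #]."] else errors
  let errors := if PySem.Str.len password < 6 then
      errors ++ ["Password must be longer than 6 characters."] else errors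
  if errors ≠ [] then some (PySem.Str.join "\n" errors) else none

-- ===== PRECONDITION & SPEC =====
def Spec_reason (password : String) (out : Option String) : Prop := out = reason_alt password
instance (password : String) (out : Option String) : Decidable (Spec_reason password out) := by unfold Spec_reason; infer_instance

-- ===== CLAIM (what is proved, stated in full; the proofs are below) =====
def Claim_equal_reason : Prop := ∀ (password : String), Dom_reason password → Spec_reason password (reason password)

-- ===== LEMMAS AND PROOFS =====

-- A's special-flag loop computes List.any of the special-char test.
theorem special_foldl_eq_any (l : List Char) (b : Bool) :
    l.foldl (fun sp x => if x = '@' ∨ x = '!' ∨ x = '?' ∨ x = '#' then true else sp) b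
      = (b || l.any (fun c => "@!?#".toList.contains c)) := by
  induction l generalizing b with
  | nil => simp
  | cons c t ih =>
    simp only [List.foldl_cons, List.any_cons, ih]
    by_cases h : c = '@' ∨ c = '!' ∨ c = '?' ∨ c = '#' <;> simp_all

theorem join_one :
    PySem.Str.join "\n" ["Password must contain speacial characters [@, !, ?, #]."]
    = "Password must contain speacial characters [@, !, ?, #]." := by
  decide

theorem join_one' :
    PySem.Str.join "\n" ["Password must be longer than 6 characters."]
    = "Password must be longer than 6 characters." := by
  decide

theorem join_two :
    PySem.Str.join "\n" ["Password must contain speacial characters [@, !, ?, #].",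
      "Password must be longer than 6 characters."]
    = "Password must contain speacial characters [@, !, ?, #].\nPassword must be longer than 6 characters." := by
  decide

-- ===== VERDICT (by name: the statement is the Claim_ definition above) =====
theorem reason_spec : Claim_equal_reason := by
  intro password _
  unfold Spec_reason reason reason_alt
  simp only [special_foldl_eq_any, Bool.false_or]
  by_cases hP : ∀ x ∈ password.toList, ¬x = '@' ∧ ¬x = '!' ∧ ¬x = '?' ∧ ¬x = '#' <;>
    by_cases hl : password.length < 6 <;>
    simp [hl] <;> split_ifs <;> simp_all [join_two, join_one, join_one']
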